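-- pv_equiv track=rewrite | github.com/b-in-R/minishell | scripts/bulk_replace/bulk_replace.py | preview_once
-- ===== SOURCE A (Python) =====
-- ANSI = {
--     "red": "\033[31m",
--     "green": "\033[32m",
--     "bold": "\033[1m",
--     "reset": "\033[0m",
--     "clear_line": "\033[2K",
--     "clear_to_end": "\033[J",
-- }
--
-- def colorize_once(line: str, needle: str, color_code: str, nth: int):
--     if not needle:
--         return line
--     start = 0
--     count = 0
--     parts = []
--     while True:
--         idx = line.find(needle, start)
--         if idx == -1:
--             parts.append(line[start:])
--             break
--         parts.append(line[start:idx])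
--         frag = needle
--         if count == nth:
--             frag = f"{color_code}{needle}{ANSI['reset']}"
--         parts.append(frag)
--         start = idx + len(needle)
--         count += 1
--     return "".join(parts)
--
-- def preview_once(before: str, old: str, new: str, nth: int):
--     # Locate nth occurrence
--     idx = -1
--     start = 0
--     count = 0
--     while True:
--         i = before.find(old, start)
--         if i == -1:
--             return None, None, None, None
--         if count == nth:
--             idx = i
--             break
--         start = i + len(old)
--         count += 1
--     after = before[:idx] + new + before[idx+len(old):]
--     before_col = colorize_once(before.rstrip('\n'), old, ANSI["red"] + ANSI["bold"], nth)
--     after_col = after.rstrip('\n')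
--     after_col = after_col[:idx] + f"{ANSI['green']}{ANSI['bold']}{new}{ANSI['reset']}" + after_col[idx+len(new):]
--     return idx, before_col, after, after_col
-- ===== SOURCE B (Python) =====
-- RED_BOLD = "\033[31m\033[1m"
-- GREEN_BOLD = "\033[32m\033[1m"
-- RESET = "\033[0m"
--
--
-- def _occurrences(s, sub):
--     """All start indices of non-overlapping matches of sub in s, left to right."""
--     positions = []
--     start = 0
--     while True:
--         i = s.find(sub, start)
--         if i == -1:
--             return positions
--         positions.append(i)
--         start = i + len(sub)
--
--
-- def preview_once(before, old, new, nth):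
--     if old:
--         positions = _occurrences(before, old)
--     else:
--         # empty pattern: one match at every gap
--         positions = list(range(len(before) + 1))
--     if nth < 0 or nth >= len(positions):
--         return (None, None, None, None)
--     idx = positions[nth]
--     after = before[:idx] + new + before[idx + len(old):]
--     bs = before.rstrip('\n')
--     if old:
--         segs = []
--         prev = 0
--         k = 0
--         for p in _occurrences(bs, old):
--             segs.append(bs[prev:p])
--             segs.append(RED_BOLD + old + RESET if k == nth else old)
--             prev = p + len(old)
--             k += 1
--         segs.append(bs[prev:])
--         before_col = "".join(segs)
--     else:
--         before_col = bs
--     asr = after.rstrip('\n')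
--     after_col = asr[:idx] + GREEN_BOLD + new + RESET + asr[idx + len(new):]
--     return (idx, before_col, after, after_col)
-- ===== Notes on version B (the rewrite author's own statement) =====
-- stated objective: alternative
-- what changed: B builds a table of all match positions once (and treats the empty pattern as matching at every gap) and then answers by list indexing and a single segment-reassembly pass, instead of A's two interleaved repeated-find loops with break-on-count.
-- intended difference: On empty old with nth >= 1, A returns index 0 and inserts at the start (its non-advancing scan makes the break-on-count fire at position 0 regardless of nth), while B inserts at gap position nth (or returns (None, None, None, None) when nth > len(before)), which is the intended nth occurrence. — e.g. on preview_once("ab", "", "X", 1): A returns (some 0, some "ab", some "Xab", some "\x1B[32m\x1B[1mX\x1B[0mab"), B returns (some 1, some "ab", some "aXb", some "a\x1B[32m\x1B[1mX\x1B[0mb")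
import Mathlib
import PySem

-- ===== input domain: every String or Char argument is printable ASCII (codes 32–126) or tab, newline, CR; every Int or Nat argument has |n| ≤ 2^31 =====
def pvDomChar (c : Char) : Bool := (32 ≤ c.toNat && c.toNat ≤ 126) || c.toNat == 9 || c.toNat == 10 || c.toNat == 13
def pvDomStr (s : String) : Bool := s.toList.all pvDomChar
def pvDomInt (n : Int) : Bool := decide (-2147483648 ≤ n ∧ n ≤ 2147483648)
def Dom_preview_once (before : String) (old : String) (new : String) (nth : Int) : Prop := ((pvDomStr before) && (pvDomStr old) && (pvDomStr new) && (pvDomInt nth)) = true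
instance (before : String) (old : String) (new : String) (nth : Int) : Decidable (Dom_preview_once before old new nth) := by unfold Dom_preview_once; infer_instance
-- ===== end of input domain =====

-- B replaces A's two interleaved repeated-find loops by a table of match positions plus a
-- segment-reassembly pass (objective: alternative decomposition, similar cost).

-- ===== PORT A =====
-- ANSI constants used by A (as code-point lists)
def pvRed : List Char := "\x1B[31m".toList
def pvGreen : List Char := "\x1B[32m".toList
def pvBold : List Char := "\x1B[1m".toList
def pvReset : List Char := "\x1B[0m".toList

-- exact port of s.rstrip('\n'): drop trailing newline characters
def pvRstripNl (cs : List Char) : List Char := (cs.reverse.dropWhile (fun c => c == '\n')).reverse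

-- the while-loop of colorize_once; fuel only makes the recursion structural (never exhausted
-- with the fuel pvColorizeOnce supplies)
def pvColorizeLoop (line needle color : List Char) (nth : Int) : Nat → Int → Int → List (List Char) → List (List Char)
  | 0, _, _, parts => parts
  | fuel+1, start, count, parts =>
    let idx := PySem.Chars.findFrom line needle start
    if idx = -1 then parts ++ [PySem.Chars.slice line (some start) none]
    else
      let parts' := parts ++ [PySem.Chars.slice line (some start) (some idx)]
      let frag := if count = nth then color ++ needle ++ pvReset else needle
      pvColorizeLoop line needle color nth fuel (idx + (needle.length : Int)) (count + 1) (parts' ++ [frag])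

def pvColorizeOnce (line needle color : List Char) (nth : Int) : List Char :=
  if needle = [] then line
  else PySem.Chars.join [] (pvColorizeLoop line needle color nth (line.length + 2) 0 0 [])

-- the locate-the-nth-occurrence while-loop of preview_once (fuel as above; with an empty `old`
-- and nth ≥ 0 the Python loop runs nth+1 times, hence the nth.toNat term in the fuel)
def pvLocateLoop (before old : List Char) (nth : Int) : Nat → Int → Int → Option Int
  | 0, _, _ => none
  | fuel+1, start, count =>
    let i := PySem.Chars.findFrom before old start
    if i = -1 then none
    else if count = nth then some i
    else pvLocateLoop before old nth fuel (i + (old.length : Int)) (count + 1)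

def preview_once (before : String) (old : String) (new : String) (nth : Int) :
    Option Int × Option String × Option String × Option String :=
  let b := before.toList
  let o := old.toList
  let n := new.toList
  match pvLocateLoop b o nth (b.length + nth.toNat + 2) 0 0 with
  | none => (none, none, none, none)
  | some idx =>
    let after := PySem.Chars.slice b none (some idx) ++ n ++ PySem.Chars.slice b (some (idx + (o.length : Int))) none
    let beforeCol := pvColorizeOnce (pvRstripNl b) o (pvRed ++ pvBold) nth
    let ac0 := pvRstripNl after
    let afterCol := PySem.Chars.slice ac0 none (some idx) ++ pvGreen ++ pvBold ++ n ++ pvReset ++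
      PySem.Chars.slice ac0 (some (idx + (n.length : Int))) none
    (some idx, some (String.ofList beforeCol), some (String.ofList after), some (String.ofList afterCol))

-- ===== PORT B =====
def pvRedBoldAlt : List Char := "\x1B[31m\x1B[1m".toList
def pvGreenBoldAlt : List Char := "\x1B[32m\x1B[1m".toList
def pvResetAlt : List Char := "\x1B[0m".toList

-- _occurrences: the position table (fuel only makes the loop structural; never exhausted)
def pvOccLoop (s sub : List Char) : Nat → Int → List Int
  | 0, _ => []
  | fuel+1, start =>
    let i := PySem.Chars.findFrom s sub start
    if i = -1 then []
    else i :: pvOccLoop s sub fuel (i + (sub.length : Int))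

def pvOccurrences (s sub : List Char) : List Int := pvOccLoop s sub (s.length + 2) 0

-- the segment-reassembly for-loop: state (segs, prev, k)
def pvSegsFold (bs o : List Char) (nth : Int) (ps : List Int) : List (List Char) × Int × Int :=
  ps.foldl
    (fun acc p =>
      (acc.1 ++ [PySem.Chars.slice bs (some acc.2.1) (some p),
                 if acc.2.2 = nth then pvRedBoldAlt ++ o ++ pvResetAlt else o],
       p + (o.length : Int), acc.2.2 + 1))
    ([], 0, 0)

def preview_once_alt (before : String) (old : String) (new : String) (nth : Int) :
    Option Int × Option String × Option String × Option String :=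
  let b := before.toList
  let o := old.toList
  let n := new.toList
  let positions := if o = [] then (List.range (b.length + 1)).map Int.ofNat else pvOccurrences b o
  if nth < 0 ∨ (positions.length : Int) ≤ nth then (none, none, none, none)
  else
    let idx := (PySem.List.pyGet? positions nth).getD 0   -- in range by the guard
    let after := PySem.Chars.slice b none (some idx) ++ n ++ PySem.Chars.slice b (some (idx + (o.length : Int))) none
    let bs := pvRstripNl b
    let beforeCol :=
      if o = [] then bs
      else
        let sf := pvSegsFold bs o nth (pvOccurrences bs o)
        PySem.Chars.join [] (sf.1 ++ [PySem.Chars.slice bs (some sf.2.1) none])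
    let asr := pvRstripNl after
    let afterCol := PySem.Chars.slice asr none (some idx) ++ pvGreenBoldAlt ++ n ++ pvResetAlt ++
      PySem.Chars.slice asr (some (idx + (n.length : Int))) none
    (some idx, some (String.ofList beforeCol), some (String.ofList after), some (String.ofList afterCol))

-- ===== PRECONDITION & SPEC =====
-- Pre_ excludes only the inputs on which A never returns: with an empty `old` and a negative
-- `nth`, A's scan never advances and its count never reaches nth, so the while-loop diverges.
def Pre_preview_once (before : String) (old : String) (new : String) (nth : Int) : Prop :=
  old = "" → 0 ≤ nth
instance (before : String) (old : String) (new : String) (nth : Int) : Decidable (Pre_preview_once before old new nth) := by unfold Pre_preview_once; infer_instance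

def pvWitness_preview_once : String × String × String × Int := ("aba\n", "a", "XY", 1)

-- On empty `old` with nth ≥ 1, A returns index 0 and inserts at the start (its non-advancing scan
-- makes the break-on-count fire at position 0 regardless of nth), while B treats the empty pattern
-- as matching at every gap and inserts at position nth (or returns the None tuple when
-- nth > len(before)), which is the intended nth occurrence.
def D_preview_once (before : String) (old : String) (new : String) (nth : Int) : Prop :=
  old = "" ∧ 1 ≤ nth
instance (before : String) (old : String) (new : String) (nth : Int) : Decidable (D_preview_once before old new nth) := by unfold D_preview_once; infer_instance

def Spec_preview_once (before : String) (old : String) (new : String) (nth : Int)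
    (out : Option Int × Option String × Option String × Option String) : Prop :=
  ¬ D_preview_once before old new nth → out = preview_once_alt before old new nth
instance (before : String) (old : String) (new : String) (nth : Int) (out : Option Int × Option String × Option String × Option String) : Decidable (Spec_preview_once before old new nth out) := by unfold Spec_preview_once; infer_instance

def pvDiffWitness_preview_once : String × String × String × Int := ("ab", "", "X", 1)
def pvDiffWitnessOut_preview_once :
    (Option Int × Option String × Option String × Option String) ×
    (Option Int × Option String × Option String × Option String) :=
  ((some 0, some "ab", some "Xab", some "\x1B[32m\x1B[1mX\x1B[0mab"),
   (some 1, some "ab", some "aXb", some "a\x1B[32m\x1B[1mX\x1B[0mb"))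

-- ===== CLAIM (what is proved, stated in full; the proofs are below) =====
def Claim_unchanged_preview_once : Prop := ∀ (before : String) (old : String) (new : String) (nth : Int), Dom_preview_once before old new nth → Pre_preview_once before old new nth → Spec_preview_once before old new nth (preview_once before old new nth)
def Claim_changed_preview_once : Prop := Dom_preview_once (pvDiffWitness_preview_once.1) (pvDiffWitness_preview_once.2.1) (pvDiffWitness_preview_once.2.2.1) (pvDiffWitness_preview_once.2.2.2) ∧ Pre_preview_once (pvDiffWitness_preview_once.1) (pvDiffWitness_preview_once.2.1) (pvDiffWitness_preview_once.2.2.1) (pvDiffWitness_preview_once.2.2.2) ∧ D_preview_once (pvDiffWitness_preview_once.1) (pvDiffWitness_preview_once.2.1) (pvDiffWitness_preview_once.2.2.1) (pvDiffWitness_preview_once.2.2.2) ∧ preview_once (pvDiffWitness_preview_once.1) (pvDiffWitness_preview_once.2.1) (pvDiffWitness_preview_once.2.2.1) (pvDiffWitness_preview_once.2.2.2) = pvDiffWitnessOut_preview_once.1 ∧ preview_once_alt (pvDiffWitness_preview_once.1) (pvDiffWitness_preview_once.2.1) (pvDiffWitness_preview_once.2.2.1) (pvDiffWitness_preview_once.2.2.2)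 = pvDiffWitnessOut_preview_once.2 ∧ pvDiffWitnessOut_preview_once.1 ≠ pvDiffWitnessOut_preview_once.2
def Claim_exact_preview_once : Prop := ∀ (before : String) (old : String) (new : String) (nth : Int), Dom_preview_once before old new nth → Pre_preview_once before old new nth → D_preview_once before old new nth → preview_once before old new nth ≠ preview_once_alt before old new nth

-- ===== LEMMAS AND PROOFS =====

theorem pvJoinNilFlatten (xs : List (List Char)) : PySem.Chars.join [] xs = xs.flatten := by
  induction xs with
  | nil => rfl
  | cons h t ih =>
    cases t with
    | nil => simp [PySem.Chars.join, List.intercalate]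
    | cons b bt =>
      simp only [PySem.Chars.join, List.intercalate, List.intersperse] at *
      simp_all [List.flatten]

-- a successful find from cursor `start` lies at or after it and its match fits inside s
theorem pvOccStep (s sub : List Char) (hsub : sub ≠ []) (start : Nat) (hsl : start ≤ s.length)
    (hi : PySem.Chars.findFrom s sub (start : Int) ≠ -1) :
    (start : Int) ≤ PySem.Chars.findFrom s sub (start : Int) ∧
    (PySem.Chars.findFrom s sub (start : Int)).toNat + sub.length ≤ s.length ∧ 1 ≤ sub.length := by
  obtain ⟨hle, hpre, -⟩ := PySem.Chars.findFrom_natCast_spec s sub start hsl hi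
  have h0 : (0:Int) ≤ PySem.Chars.findFrom s sub (start : Int) := le_trans (by positivity) hle
  have hlen1 : 1 ≤ sub.length := by
    cases sub with
    | nil => simp at hsub
    | cons a t => simp
  refine ⟨hle, ?_, hlen1⟩
  have := hpre.length_le
  simp only [List.length_drop] at this
  omega

-- fuel irrelevance of the occurrence scan (sub nonempty; the cursor stays within s)
theorem pvOccLoop_fuel (s sub : List Char) (hsub : sub ≠ []) :
    ∀ f g start : Nat, start ≤ s.length → s.length - start < f → s.length - start < g →
      pvOccLoop s sub f (start : Int) = pvOccLoop s sub g (start : Int) := by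
  intro f
  induction f with
  | zero => intro g start _ hf _; omega
  | succ f ih =>
    intro g start hsl hf hg
    cases g with
    | zero => omega
    | succ g =>
      simp only [pvOccLoop]
      by_cases hi : PySem.Chars.findFrom s sub (start : Int) = -1
      · simp [hi]
      · simp only [hi, if_false]
        obtain ⟨hle, hfit, hlen1⟩ := pvOccStep s sub hsub start hsl hi
        have h0 : (0:Int) ≤ PySem.Chars.findFrom s sub (start : Int) := le_trans (by positivity) hle
        have hcast : PySem.Chars.findFrom s sub (start : Int) + (sub.length : Int)
            = (((PySem.Chars.findFrom s sub (start : Int)).toNat + sub.length : Nat) : Int) := by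
          push_cast; omega
        rw [hcast, ih g _ (by omega) (by omega) (by omega)]

-- A's locate loop reads the (nth - count)-th entry of B's table (same fuel, lockstep)
theorem pvLocate_occ (b o : List Char) (nth : Int) :
    ∀ (f : Nat) (start count : Int), count ≤ nth →
      pvLocateLoop b o nth f start count = (pvOccLoop b o f start)[(nth - count).toNat]? := by
  intro f
  induction f with
  | zero => intro start count _; simp [pvLocateLoop, pvOccLoop]
  | succ f ih =>
    intro start count h
    simp only [pvLocateLoop, pvOccLoop]
    by_cases hi : PySem.Chars.findFrom b o start = -1
    · simp [hi]
    · simp only [hi, if_false]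
      by_cases hc : count = nth
      · subst hc; simp
      · have : (nth - count).toNat = (nth - (count+1)).toNat + 1 := by omega
        rw [if_neg hc, ih _ _ (by omega), this]
        simp

theorem pvLocate_none_of_lt (b o : List Char) (nth : Int) :
    ∀ (f : Nat) (start count : Int), nth < count →
      pvLocateLoop b o nth f start count = none := by
  intro f
  induction f with
  | zero => intro start count _; simp [pvLocateLoop]
  | succ f ih =>
    intro start count h
    simp only [pvLocateLoop]
    by_cases hi : PySem.Chars.findFrom b o start = -1
    · simp [hi]
    · rw [if_neg hi, if_neg (by omega), ih _ _ (by omega)]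

-- with an empty pattern A's scan never advances: the loop ends at index 0 after nth+1 rounds
theorem pvLocate_empty (b : List Char) (nth : Int) :
    ∀ (f : Nat) (count : Int), count ≤ nth → (nth - count).toNat < f →
      pvLocateLoop b [] nth f 0 count = some 0 := by
  intro f
  induction f with
  | zero => intro count h hf; omega
  | succ f ih =>
    intro count h hf
    simp only [pvLocateLoop, PySem.Chars.findFrom_zero, PySem.Chars.find_nil]
    by_cases hc : count = nth
    · simp [hc]
    · rw [if_neg (by norm_num), if_neg hc]
      simpa using ih (count+1) (by omega) (by omega)

-- the common segment decomposition both colourings reach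
def pvSegSpec (bs o : List Char) (nth : Int) : List Int → Int → Int → List Char
  | [], prev, _ => PySem.Chars.slice bs (some prev) none
  | p :: ps, prev, c =>
    PySem.Chars.slice bs (some prev) (some p) ++
    (if c = nth then pvRedBoldAlt ++ o ++ pvResetAlt else o) ++
    pvSegSpec bs o nth ps (p + (o.length : Int)) (c + 1)

theorem pvColorize_spec (bs o : List Char) (hsub : o ≠ []) (nth : Int) :
    ∀ (f : Nat) (start : Nat) (count : Int) (parts : List (List Char)),
      start ≤ bs.length → bs.length - start < f →
      PySem.Chars.join [] (pvColorizeLoop bs o (pvRed ++ pvBold) nth f (start : Int) count parts) =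
        PySem.Chars.join [] parts ++ pvSegSpec bs o nth (pvOccLoop bs o f (start : Int)) (start : Int) count := by
  intro f
  induction f with
  | zero => intro start count parts _ hf; omega
  | succ f ih =>
    intro start count parts hsl hf
    simp only [pvColorizeLoop, pvOccLoop]
    by_cases hi : PySem.Chars.findFrom bs o (start : Int) = -1
    · simp [hi, pvSegSpec, pvJoinNilFlatten]
    · simp only [hi, if_false]
      obtain ⟨hle, hfit, hlen1⟩ := pvOccStep bs o hsub start hsl hi
      have h0 : (0:Int) ≤ PySem.Chars.findFrom bs o (start : Int) := le_trans (by positivity) hle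
      have hcast : PySem.Chars.findFrom bs o (start : Int) + (o.length : Int)
          = (((PySem.Chars.findFrom bs o (start : Int)).toNat + o.length : Nat) : Int) := by
        push_cast; omega
      rw [hcast, ih _ (count+1) _ (by omega) (by omega)]
      have hRB : pvRed ++ pvBold = pvRedBoldAlt := by decide
      have hRS : pvReset = pvResetAlt := by decide
      simp [pvSegSpec, pvJoinNilFlatten, hRB, hRS, hcast]

theorem pvSegsFoldGen (bs o : List Char) (nth : Int) :
    ∀ (ps : List Int) (segs : List (List Char)) (prev k : Int),
      PySem.Chars.join []
        ((ps.foldl (fun acc p =>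
            (acc.1 ++ [PySem.Chars.slice bs (some acc.2.1) (some p),
                       if acc.2.2 = nth then pvRedBoldAlt ++ o ++ pvResetAlt else o],
             p + (o.length : Int), acc.2.2 + 1)) (segs, prev, k)).1 ++
         [PySem.Chars.slice bs (some (ps.foldl (fun acc p =>
            (acc.1 ++ [PySem.Chars.slice bs (some acc.2.1) (some p),
                       if acc.2.2 = nth then pvRedBoldAlt ++ o ++ pvResetAlt else o],
             p + (o.length : Int), acc.2.2 + 1)) (segs, prev, k)).2.1) none]) =
      PySem.Chars.join [] segs ++ pvSegSpec bs o nth ps prev k := by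
  intro ps
  induction ps with
  | nil => intro segs prev k; simp [pvSegSpec, pvJoinNilFlatten]
  | cons p t ih =>
    intro segs prev k
    simp only [List.foldl_cons]
    rw [ih]
    simp [pvSegSpec, pvJoinNilFlatten]

theorem pvSegsFold_spec (bs o : List Char) (nth : Int) (ps : List Int) :
    PySem.Chars.join [] ((pvSegsFold bs o nth ps).1 ++ [PySem.Chars.slice bs (some (pvSegsFold bs o nth ps).2.1) none]) =
      pvSegSpec bs o nth ps 0 0 := by
  have := pvSegsFoldGen bs o nth ps [] 0 0
  simpa [pvSegsFold] using this

-- ===== VERDICT (by name: the statement is the Claim_ definition above) =====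
theorem preview_once_spec : Claim_unchanged_preview_once := by
  unfold Claim_unchanged_preview_once
  intro before old new nth _ hpre hnd
  show preview_once before old new nth = preview_once_alt before old new nth
  by_cases hO : old.toList = []
  case pos =>
    have hold : old = "" := String.toList_eq_nil_iff.mp hO
    have hn0 : 0 ≤ nth := hpre hold
    have hn1 : nth < 1 := by
      by_contra hc
      exact hnd ⟨hold, by omega⟩
    have hnth : nth = 0 := by omega
    subst hnth
    have hp0 : ∀ (xs : List Int), PySem.List.pyGet? xs (0:Int) = xs[0]? := by
      intro xs
      exact_mod_cast PySem.List.pyGet?_natCast xs 0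
    simp only [preview_once, preview_once_alt, hO]
    rw [pvLocate_empty before.toList 0 _ 0 le_rfl (by simp)]
    rw [if_neg (by simp), hp0]
    have h00 : ∀ h, (List.flatMap (fun a : Nat => [(a:Int)]) (List.range (before.length + 1)))[0]'h = (0:Int) := by
      intro h
      simp [List.range_succ_eq_map]
    have hGB : String.ofList pvGreenBoldAlt = String.ofList pvGreen ++ String.ofList pvBold := by decide
    have hRS : pvResetAlt = pvReset := by decide
    norm_num [h00, pvColorizeOnce, hGB, hRS, String.append_assoc]
  case neg =>
    by_cases hn : nth < 0
    · simp only [preview_once, preview_once_alt]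
      rw [pvLocate_none_of_lt before.toList old.toList nth _ 0 0 hn, if_pos (Or.inl hn)]
    · push_neg at hn
      have hocc : pvLocateLoop before.toList old.toList nth (before.toList.length + nth.toNat + 2) 0 0
          = (pvOccurrences before.toList old.toList)[nth.toNat]? := by
        rw [pvLocate_occ before.toList old.toList nth _ 0 0 hn]
        simp only [Int.sub_zero]
        have := pvOccLoop_fuel before.toList old.toList hO
          (before.toList.length + nth.toNat + 2) (before.toList.length + 2) 0 (by omega) (by omega) (by omega)
        simp only [Nat.cast_zero] at this
        rw [pvOccurrences, this]
      cases h : (pvOccurrences before.toList old.toList)[nth.toNat]? with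
      | none =>
        have hge : (pvOccurrences before.toList old.toList).length ≤ nth.toNat := List.getElem?_eq_none_iff.mp h
        simp only [preview_once, preview_once_alt, if_neg hO, hocc, h]
        rw [if_pos (Or.inr (by omega))]
      | some idx =>
        have hlt : nth.toNat < (pvOccurrences before.toList old.toList).length := by
          by_contra hc
          rw [List.getElem?_eq_none_iff.mpr (by omega)] at h
          simp at h
        have hnc : nth = ((nth.toNat : Nat) : Int) := (Int.toNat_of_nonneg hn).symm
        have hpg : PySem.List.pyGet? (pvOccurrences before.toList old.toList) nth = some idx := by
          rw [hnc, PySem.List.pyGet?_natCast, h]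
        simp only [preview_once, preview_once_alt, if_neg hO, hocc, h]
        rw [if_neg (by omega), hpg]
        have hbc : pvColorizeOnce (pvRstripNl before.toList) old.toList (pvRed ++ pvBold) nth =
            pvSegSpec (pvRstripNl before.toList) old.toList nth
              (pvOccurrences (pvRstripNl before.toList) old.toList) 0 0 := by
          rw [pvColorizeOnce, if_neg hO]
          have := pvColorize_spec (pvRstripNl before.toList) old.toList hO nth
            ((pvRstripNl before.toList).length + 2) 0 0 [] (by omega) (by omega)
          simp only [Nat.cast_zero] at this
          rw [this, pvOccurrences]
          rfl
        have hsf := pvSegsFold_spec (pvRstripNl before.toList) old.toList nth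
          (pvOccurrences (pvRstripNl before.toList) old.toList)
        have hGB : String.ofList pvGreenBoldAlt = String.ofList pvGreen ++ String.ofList pvBold := by decide
        have hRS : pvResetAlt = pvReset := by decide
        simp only [PySem.Chars.slice_eq_listSlice] at hsf
        norm_num [hbc, hsf, hGB, hRS, String.append_assoc]

theorem preview_once_changed : Claim_changed_preview_once := by
  unfold Claim_changed_preview_once; decide

theorem preview_once_tight : Claim_exact_preview_once := by
  unfold Claim_exact_preview_once
  intro before old new nth _ _ hd heq
  obtain ⟨hold, hn1⟩ := hd
  have hO : old.toList = [] := by rw [hold]; rfl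
  have hlen : before.toList.length = before.length := by simp
  have hA : (preview_once before old new nth).1 = some 0 := by
    simp only [preview_once, hO]
    rw [pvLocate_empty before.toList nth _ 0 (by omega) (by omega)]
  have h1 : (preview_once before old new nth).1 = (preview_once_alt before old new nth).1 := by
    rw [heq]
  rw [hA] at h1
  by_cases hg : (before.toList.length : Int) + 1 ≤ nth
  · have hB : preview_once_alt before old new nth = (none, none, none, none) := by
      simp only [preview_once_alt, hO]
      rw [if_pos (Or.inr (by simp; omega))]
    rw [hB] at h1
    simp at h1
  · have hnc : nth = ((nth.toNat : Nat) : Int) := (Int.toNat_of_nonneg (by omega)).symm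
    have hlt : nth.toNat < before.length + 1 := by omega
    have hB : (preview_once_alt before old new nth).1 = some nth := by
      simp only [preview_once_alt, hO]
      rw [if_neg (by simp; omega)]
      have hpg : PySem.List.pyGet? ((List.range (before.length + 1)).map Int.ofNat) nth
          = some nth := by
        rw [hnc, PySem.List.pyGet?_natCast, List.getElem?_map, List.getElem?_range hlt]
        simp [← hnc]
      simp [hpg]
    rw [hB] at h1
    simp at h1
    omega
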